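-- pv_equiv track=rewrite | github.com/zachtong/pyALDIC | src/al_dic/solver/seed_auto_place.py | _bfs_max_depth
-- ===== SOURCE A (Python) =====
-- def _bfs_max_depth(
--     start: int,
--     allowed: set[int],
--     adjacency: list[set[int]],
-- ) -> int:
--     """BFS from ``start``, staying within ``allowed``; returns max layer.
--
--     Duplicated from ``SeedController`` so this module carries no GUI
--     dependency. The two copies are structurally identical and should
--     stay in sync.
--     """
--     if start not in allowed:
--         return 0
--     visited = {start}
--     frontier = {start}
--     depth = 0
--     while frontier:
--         nxt: set[int] = set()
--         for node in frontier:
--             for nb in adjacency[node]: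
--                 if nb in allowed and nb not in visited:
--                     visited.add(nb)
--                     nxt.add(nb)
--         if not nxt:
--             break
--         depth += 1
--         frontier = nxt
--     return depth
-- ===== SOURCE B (Python) =====
-- def _bfs_max_depth(start, allowed, adjacency):
--     """Fixpoint iteration: grow the reachable-within-``allowed`` set until it
--     stops growing; the number of strict growth rounds is the max BFS layer."""
--     if start not in allowed:
--         return 0
--     reached = {start}
--     depth = 0
--     while True:
--         grown = reached.union(*(adjacency[node] & allowed for node in reached))
--         if len(grown) == len(reached):
--             return depth
--         reached = grown
--         depth += 1
-- ===== Notes on version B (the rewrite author's own statement) =====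
-- stated objective: alternative
-- what changed: Replaces the frontier/visited level-synchronous BFS (expand only the newest layer, count layers with a shared depth counter, stop on empty next-frontier) by a monotone fixpoint iteration: one reachable set is re-closed under set-intersection neighbourhoods (reached.union(*(adjacency[node] & allowed ...))) each round and the answer is the number of rounds in which its cardinality strictly grows.
-- outside the precondition, e.g. on _bfs_max_depth(0, {0, 5}, [set()]): A returns 0, B returns 0
import Mathlib
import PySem

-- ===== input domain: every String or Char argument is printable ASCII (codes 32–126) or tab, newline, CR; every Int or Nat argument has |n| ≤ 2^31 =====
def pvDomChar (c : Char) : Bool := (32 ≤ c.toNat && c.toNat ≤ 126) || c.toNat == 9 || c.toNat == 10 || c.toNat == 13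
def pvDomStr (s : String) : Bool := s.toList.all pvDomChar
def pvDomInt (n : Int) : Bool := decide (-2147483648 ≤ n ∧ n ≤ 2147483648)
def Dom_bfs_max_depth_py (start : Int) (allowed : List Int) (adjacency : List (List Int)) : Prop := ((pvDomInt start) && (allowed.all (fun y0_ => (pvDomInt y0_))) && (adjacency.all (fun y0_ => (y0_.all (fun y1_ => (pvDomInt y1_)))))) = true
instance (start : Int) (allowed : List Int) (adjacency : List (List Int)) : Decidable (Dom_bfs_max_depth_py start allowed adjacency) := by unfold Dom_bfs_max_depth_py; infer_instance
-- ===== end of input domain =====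

-- B replaces the level-synchronous frontier/visited BFS by a fixpoint iteration on one reachable
-- set, counting the rounds in which it strictly grows ("alternative": different algorithm, same results).

-- ===== PORT A =====
-- adjacency[node] (Python indexing, negative indices wrap); total form, in range under Pre_
def pvAdj (adjacency : List (List Int)) (node : Int) : List Int :=
  (PySem.List.pyGet? adjacency node).getD []

-- body of A's innermost loop: if nb in allowed and nb not in visited: visited.add(nb); nxt.add(nb)
def pvStepA (allowed : List Int) (s : List Int × List Int) (nb : Int) : List Int × List Int :=
  if nb ∈ allowed ∧ nb ∉ s.1 then (PySem.Set.add s.1 nb, PySem.Set.add s.2 nb) else s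

-- for node in frontier: for nb in adjacency[node]: … , over the state (visited, nxt)
def pvExpandA (allowed : List Int) (adjacency : List (List Int))
    (frontier : List Int) (s : List Int × List Int) : List Int × List Int :=
  frontier.foldl (fun s node => (pvAdj adjacency node).foldl (pvStepA allowed) s) s

-- A's while-loop, made total by a fuel bound (each continued round strictly grows visited,
-- a duplicate-free list drawn from allowed, so allowed.length + 1 rounds suffice)
def pvLoopA (allowed : List Int) (adjacency : List (List Int)) :
    Nat → List Int → List Int → Int → Int
  | 0, _, _, depth => depth
  | fuel + 1, visited, frontier, depth =>
    if frontier = [] then depth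
    else
      let s := pvExpandA allowed adjacency frontier (visited, [])
      if s.2 = [] then depth
      else pvLoopA allowed adjacency fuel s.1 s.2 (depth + 1)

def bfs_max_depth_py (start : Int) (allowed : List Int) (adjacency : List (List Int)) : Int :=
  if start ∈ allowed then
    pvLoopA allowed adjacency (allowed.length + 1) [start] [start] 0
  else 0

-- ===== PORT B =====
-- grown = reached.union(*(adjacency[node] & allowed for node in reached))
def pvUnionStep (allowed : List Int) (adjacency : List (List Int))
    (acc : List Int) (node : Int) : List Int :=
  PySem.Set.union acc (PySem.Set.inter (pvAdj adjacency node) allowed)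

def pvGrow (allowed : List Int) (adjacency : List (List Int)) (reached : List Int) : List Int :=
  reached.foldl (pvUnionStep allowed adjacency) reached

-- B's while True loop, made total by the same fuel bound (reached grows strictly until the last round)
def pvLoopB (allowed : List Int) (adjacency : List (List Int)) :
    Nat → List Int → Int → Int
  | 0, _, depth => depth
  | fuel + 1, reached, depth =>
    let grown := pvGrow allowed adjacency reached
    if grown.length = reached.length then depth
    else pvLoopB allowed adjacency fuel grown (depth + 1)

def bfs_max_depth_py_alt (start : Int) (allowed : List Int) (adjacency : List (List Int)) : Int :=
  if start ∈ allowed then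
    pvLoopB allowed adjacency (allowed.length + 1) [start] 0
  else 0

-- ===== PRECONDITION & SPEC =====
-- Pre_ excludes inputs on which some member of allowed is not a valid (possibly negative) index into
-- adjacency: on those Python can hit IndexError while expanding (it indexes only nodes it reaches, all
-- of which lie in allowed, so when such a node stays unreached A still returns — a closed-form
-- over-approximation, see the cite). If start ∉ allowed nothing is ever indexed and A is total.
def Pre_bfs_max_depth_py (start : Int) (allowed : List Int) (adjacency : List (List Int)) : Prop :=
  start ∈ allowed →
    ∀ a ∈ allowed, -(adjacency.length : Int) ≤ a ∧ a < (adjacency.length : Int)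

instance (start : Int) (allowed : List Int) (adjacency : List (List Int)) :
    Decidable (Pre_bfs_max_depth_py start allowed adjacency) := by
  unfold Pre_bfs_max_depth_py; infer_instance

def pvWitness_bfs_max_depth_py : Int × List Int × List (List Int) := (0, [0, 1], [[1], [0]])

def Spec_bfs_max_depth_py (start : Int) (allowed : List Int) (adjacency : List (List Int)) (out : Int) : Prop := out = bfs_max_depth_py_alt start allowed adjacency
instance (start : Int) (allowed : List Int) (adjacency : List (List Int)) (out : Int) : Decidable (Spec_bfs_max_depth_py start allowed adjacency out) := by unfold Spec_bfs_max_depth_py; infer_instance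

-- ===== CLAIM (what is proved, stated in full; the proofs are below) =====
def Claim_equal_bfs_max_depth_py : Prop := ∀ (start : Int) (allowed : List Int) (adjacency : List (List Int)), Dom_bfs_max_depth_py start allowed adjacency → Pre_bfs_max_depth_py start allowed adjacency → Spec_bfs_max_depth_py start allowed adjacency (bfs_max_depth_py start allowed adjacency)

-- ===== LEMMAS AND PROOFS =====

-- adding elements that are already present changes nothing
lemma pv_foldl_add_of_subset (l acc : List Int) (h : ∀ y ∈ l, y ∈ acc) :
    l.foldl PySem.Set.add acc = acc := by
  induction l with
  | nil => rfl
  | cons y l ih =>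
    have hy : PySem.Set.add acc y = acc := by
      simp [PySem.Set.add, PySem.Set.contains, h y (by simp)]
    simpa [List.foldl_cons, hy] using ih (fun z hz => h z (by simp [hz]))

-- one inner pass of A from (v, n) appends the same fresh block d to both components,
-- and that v ++ d is exactly B's union-with-intersection of the same adjacency list
lemma pv_inner_spec (allowed : List Int) :
    ∀ (l v n : List Int), (∀ x ∈ n, x ∈ v) →
      ∃ d, l.foldl (pvStepA allowed) (v, n) = (v ++ d, n ++ d) ∧
        (l.filter (fun nb => PySem.Set.contains allowed nb)).foldl PySem.Set.add v = v ++ d := by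
  intro l
  induction l with
  | nil => intro v n _; exact ⟨[], by simp⟩
  | cons nb l ih =>
    intro v n hnv
    by_cases ha : nb ∈ allowed
    · by_cases hv : nb ∈ v
      · have hstep : pvStepA allowed (v, n) nb = (v, n) := by
          simp [pvStepA, hv]
        have hadd : PySem.Set.add v nb = v := by
          simp [PySem.Set.add, PySem.Set.contains, hv]
        obtain ⟨d, h1, h2⟩ := ih v n hnv
        exact ⟨d, by simpa [List.foldl_cons, hstep], by
          simpa [List.filter_cons, PySem.Set.contains, ha, List.foldl_cons, hadd] using h2⟩
      · have hn : nb ∉ n := fun h => hv (hnv nb h)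
        have hstep : pvStepA allowed (v, n) nb = (v ++ [nb], n ++ [nb]) := by
          simp [pvStepA, ha, hv, PySem.Set.add, PySem.Set.contains, hn]
        have hadd : PySem.Set.add v nb = v ++ [nb] := by
          simp [PySem.Set.add, PySem.Set.contains, hv]
        obtain ⟨d, h1, h2⟩ := ih (v ++ [nb]) (n ++ [nb])
          (fun x hx => by
            rcases List.mem_append.mp hx with h | h
            · exact List.mem_append.mpr (Or.inl (hnv x h))
            · exact List.mem_append.mpr (Or.inr h))
        refine ⟨nb :: d, ?_, ?_⟩
        · simpa [List.foldl_cons, hstep, List.append_assoc] using h1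
        · simpa [List.filter_cons, PySem.Set.contains, ha, List.foldl_cons, hadd,
            List.append_assoc] using h2
    · have hstep : pvStepA allowed (v, n) nb = (v, n) := by
        simp [pvStepA, ha]
      obtain ⟨d, h1, h2⟩ := ih v n hnv
      exact ⟨d, by simpa [List.foldl_cons, hstep], by
        simpa [List.filter_cons, PySem.Set.contains, ha] using h2⟩

-- a B-round over a node whose allowed neighbours are already in acc changes nothing
lemma pv_unionStep_id (allowed : List Int) (adjacency : List (List Int)) (acc : List Int) (x : Int)
    (h : ∀ nb ∈ pvAdj adjacency x, nb ∈ allowed → nb ∈ acc) :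
    pvUnionStep allowed adjacency acc x = acc := by
  unfold pvUnionStep PySem.Set.union PySem.Set.update PySem.Set.inter
  apply pv_foldl_add_of_subset
  intro y hy
  have := List.of_mem_filter hy
  exact h y (List.mem_of_mem_filter hy) (by simpa [PySem.Set.contains] using this)

-- the B-fold over nodes all of whose allowed neighbours are in acc is the identity
lemma pv_prefix_phase (allowed : List Int) (adjacency : List (List Int)) :
    ∀ (p acc : List Int), (∀ x ∈ p, ∀ nb ∈ pvAdj adjacency x, nb ∈ allowed → nb ∈ acc) →
      p.foldl (pvUnionStep allowed adjacency) acc = acc := by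
  intro p
  induction p with
  | nil => intro acc _; rfl
  | cons x p ih =>
    intro acc h
    have hx := pv_unionStep_id allowed adjacency acc x (h x (by simp))
    simpa [List.foldl_cons, hx] using ih acc (fun y hy => h y (by simp [hy]))

-- lock step: A's fold over the frontier from (v, n) appends a block d to both components,
-- and B's fold over the same node list from v produces the same v ++ d
lemma pv_lockstep (allowed : List Int) (adjacency : List (List Int)) :
    ∀ (fs v n : List Int), (∀ x ∈ n, x ∈ v) →
      ∃ d, pvExpandA allowed adjacency fs (v, n) = (v ++ d, n ++ d) ∧
        fs.foldl (pvUnionStep allowed adjacency) v = v ++ d := by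
  intro fs
  induction fs with
  | nil => intro v n _; exact ⟨[], by simp [pvExpandA]⟩
  | cons node fs ih =>
    intro v n hnv
    obtain ⟨d0, h1, h2⟩ := pv_inner_spec allowed (pvAdj adjacency node) v n hnv
    obtain ⟨d1, h3, h4⟩ := ih (v ++ d0) (n ++ d0)
      (fun x hx => by
        rcases List.mem_append.mp hx with h | h
        · exact List.mem_append.mpr (Or.inl (hnv x h))
        · exact List.mem_append.mpr (Or.inr h))
    refine ⟨d0 ++ d1, ?_, ?_⟩
    · have : pvExpandA allowed adjacency (node :: fs) (v, n)
          = pvExpandA allowed adjacency fs (v ++ d0, n ++ d0) := by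
        simp [pvExpandA, List.foldl_cons, h1]
      rw [this, h3]
      simp [List.append_assoc]
    · have hstep : pvUnionStep allowed adjacency v node = v ++ d0 := by
        unfold pvUnionStep PySem.Set.union PySem.Set.update PySem.Set.inter
        exact h2
      calc (node :: fs).foldl (pvUnionStep allowed adjacency) v
          = fs.foldl (pvUnionStep allowed adjacency) (v ++ d0) := by
            simp [List.foldl_cons, hstep]
        _ = v ++ d0 ++ d1 := h4
        _ = v ++ (d0 ++ d1) := by simp [List.append_assoc]

-- the visited component only grows along A's folds
lemma pv_inner_mono (allowed : List Int) :
    ∀ (l : List Int) (s : List Int × List Int) (x : Int), x ∈ s.1 →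
      x ∈ (l.foldl (pvStepA allowed) s).1 := by
  intro l
  induction l with
  | nil => intro s x hx; simpa using hx
  | cons nb l ih =>
    intro s x hx
    rw [List.foldl_cons]
    apply ih
    by_cases hcond : nb ∈ allowed ∧ nb ∉ s.1
    · simp only [pvStepA, if_pos hcond]
      simp only [PySem.Set.add]
      split <;> simp [hx]
    · simp only [pvStepA, if_neg hcond]
      exact hx

lemma pv_outer_mono (allowed : List Int) (adjacency : List (List Int)) :
    ∀ (fs : List Int) (s : List Int × List Int) (x : Int), x ∈ s.1 →
      x ∈ (pvExpandA allowed adjacency fs s).1 := by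
  intro fs
  induction fs with
  | nil => intro s x hx; simpa [pvExpandA] using hx
  | cons node fs ih =>
    intro s x hx
    have := pv_inner_mono allowed (pvAdj adjacency node) s x hx
    simpa [pvExpandA, List.foldl_cons] using
      ih ((pvAdj adjacency node).foldl (pvStepA allowed) s) x this

-- after A's inner pass over l, every allowed member of l is in visited
lemma pv_inner_cover (allowed : List Int) :
    ∀ (l : List Int) (s : List Int × List Int) (nb : Int), nb ∈ l → nb ∈ allowed →
      nb ∈ (l.foldl (pvStepA allowed) s).1 := by
  intro l
  induction l with
  | nil => intro s nb h; cases h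
  | cons y l ih =>
    intro s nb hmem ha
    rcases List.mem_cons.mp hmem with h | h
    · subst h
      rw [List.foldl_cons]
      apply pv_inner_mono
      by_cases hcond : nb ∈ allowed ∧ nb ∉ s.1
      · simp only [pvStepA, if_pos hcond]
        simp only [PySem.Set.add]
        split <;> simp_all
      · simp only [pvStepA, if_neg hcond]
        by_contra hns
        exact hcond ⟨ha, hns⟩
    · exact ih _ nb h ha

-- after one A-round, every allowed neighbour of a frontier node is in the new visited
lemma pv_outer_cover (allowed : List Int) (adjacency : List (List Int)) :
    ∀ (fs : List Int) (s : List Int × List Int) (x : Int), x ∈ fs →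
      ∀ nb ∈ pvAdj adjacency x, nb ∈ allowed →
        nb ∈ (pvExpandA allowed adjacency fs s).1 := by
  intro fs
  induction fs with
  | nil => intro s x h; cases h
  | cons node fs ih =>
    intro s x hmem nb hnb ha
    rcases List.mem_cons.mp hmem with h | h
    · subst h
      have := pv_inner_cover allowed (pvAdj adjacency x) s nb hnb ha
      simpa [pvExpandA, List.foldl_cons] using
        pv_outer_mono allowed adjacency fs ((pvAdj adjacency x).foldl (pvStepA allowed) s) nb this
    · simpa [pvExpandA, List.foldl_cons] using
        ih ((pvAdj adjacency node).foldl (pvStepA allowed) s) x h nb hnb ha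

-- main loop coupling: A's (visited = p ++ f, frontier = f) ↔ B's (reached = p ++ f),
-- provided every allowed neighbour of an old node (p) is already known
lemma pv_loop_eq (allowed : List Int) (adjacency : List (List Int)) :
    ∀ (fuel : Nat) (p f : List Int) (depth : Int), f ≠ [] →
      (∀ x ∈ p, ∀ nb ∈ pvAdj adjacency x, nb ∈ allowed → nb ∈ p ++ f) →
      pvLoopA allowed adjacency fuel (p ++ f) f depth
        = pvLoopB allowed adjacency fuel (p ++ f) depth := by
  intro fuel
  induction fuel with
  | zero => intro p f depth _ _; rfl
  | succ fuel ih =>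
    intro p f depth hf hp
    obtain ⟨d, hA, hB⟩ := pv_lockstep allowed adjacency f (p ++ f) [] (by simp)
    have hgrow : pvGrow allowed adjacency (p ++ f) = (p ++ f) ++ d := by
      unfold pvGrow
      rw [List.foldl_append, pv_prefix_phase allowed adjacency p (p ++ f) hp, hB]
    by_cases hd : d = []
    · subst hd
      simp only [pvLoopA, pvLoopB, if_neg hf, hgrow, hA]
      simp
    · have hlen : ¬ ((p ++ f ++ d).length = (p ++ f).length) := by
        intro hle
        apply hd
        simp [List.length_append] at hle
        exact hle
      have hcov : ∀ x ∈ p ++ f, ∀ nb ∈ pvAdj adjacency x, nb ∈ allowed → nb ∈ (p ++ f) ++ d := by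
        intro x hx nb hnb ha
        rcases List.mem_append.mp hx with h | h
        · exact List.mem_append.mpr (Or.inl (hp x h nb hnb ha))
        · have := pv_outer_cover allowed adjacency f (p ++ f, []) x h nb hnb ha
          rw [hA] at this
          simpa using this
      simp only [pvLoopA, pvLoopB, if_neg hf, hgrow, hA, List.nil_append]
      rw [if_neg hd, if_neg hlen]
      exact ih (p ++ f) d (depth + 1) hd hcov

-- ===== VERDICT (by name: the statement is the Claim_ definition above) =====
theorem bfs_max_depth_py_spec : Claim_equal_bfs_max_depth_py := by
  intro start allowed adjacency _dom _pre
  unfold Spec_bfs_max_depth_py bfs_max_depth_py bfs_max_depth_py_alt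
  by_cases h : start ∈ allowed
  · simp only [if_pos h]
    simpa using pv_loop_eq allowed adjacency (allowed.length + 1) [] [start] 0
      (by simp) (by simp)
  · simp [h]
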